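-- pv_equiv track=rewrite | github.com/tvanaken/HappyPaws | puzzles/Kaitenzushi.py | getMaximumEatenDishCount
-- ===== SOURCE A (Python) =====
-- from typing import List
--
-- def getMaximumEatenDishCount(N: int, D: List[int], K: int) -> int:
--   # Write your code here
--   eatenMap = {}
--   eaten = 0
--   #eatenLst = list(set(D[0:K]))
--
--   for dish in D:
--
--     touched = eatenMap.get(dish)
--
--     if touched is None or eaten - touched >= K:
--       eaten += 1
--       eatenMap[dish] = eaten
--
--   return eaten
-- ===== SOURCE B (Python) =====
-- from collections import deque
-- from typing import List
--
-- def getMaximumEatenDishCount(N: int, D: List[int], K: int) -> int: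
--   window = deque()
--   in_window = set()
--   eaten = 0
--   for dish in D:
--     if dish in in_window:
--       continue
--     eaten += 1
--     window.append(dish)
--     in_window.add(dish)
--     if len(window) > K:
--       in_window.discard(window.popleft())
--   return eaten
-- ===== Notes on version B (the rewrite author's own statement) =====
-- stated objective: idiomatic
-- what changed: Replaces A's dict of last-eaten counters compared arithmetically (eaten - touched >= K) with an explicit evicting FIFO window: a deque of the last K eaten dish types plus a set for O(1) membership.
import Mathlib
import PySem

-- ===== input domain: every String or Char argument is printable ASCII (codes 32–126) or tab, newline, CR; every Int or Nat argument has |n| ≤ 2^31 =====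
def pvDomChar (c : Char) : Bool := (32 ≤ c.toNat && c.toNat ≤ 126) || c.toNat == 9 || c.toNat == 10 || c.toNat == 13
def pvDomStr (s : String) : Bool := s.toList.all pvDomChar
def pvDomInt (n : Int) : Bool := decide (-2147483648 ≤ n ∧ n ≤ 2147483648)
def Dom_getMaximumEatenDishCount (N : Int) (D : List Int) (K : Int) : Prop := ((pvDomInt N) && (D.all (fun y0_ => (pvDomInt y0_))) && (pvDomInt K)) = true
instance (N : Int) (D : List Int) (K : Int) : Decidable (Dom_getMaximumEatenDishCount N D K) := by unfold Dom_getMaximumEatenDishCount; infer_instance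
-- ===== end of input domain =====

-- B replaces A's dict of last-eaten counters (compared arithmetically) with an explicit
-- evicting FIFO window (deque + membership set); objective: idiomatic, same O(n) cost.

-- ===== PORT A =====
-- one loop iteration of A: state = (eatenMap, eaten)
def pvAStep (K : Int) (st : PySem.Dict Int Int × Int) (dish : Int) : PySem.Dict Int Int × Int :=
  match PySem.Dict.get? st.1 dish with
  | none => (PySem.Dict.insert st.1 dish (st.2 + 1), st.2 + 1)
  | some touched =>
      if st.2 - touched ≥ K then (PySem.Dict.insert st.1 dish (st.2 + 1), st.2 + 1)
      else st

def getMaximumEatenDishCount (N : Int) (D : List Int) (K : Int) : Int :=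
  (D.foldl (pvAStep K) (PySem.Dict.empty, 0)).2

-- ===== PORT B =====
-- one loop iteration of B: state = (window (front = oldest), membership set, eaten)
def pvBStep (K : Int) (st : List Int × PySem.Set Int × Int) (dish : Int) :
    List Int × PySem.Set Int × Int :=
  if PySem.Set.contains st.2.1 dish then st
  else
    let e := st.2.2 + 1
    let w := st.1 ++ [dish]
    let s := PySem.Set.add st.2.1 dish
    if ((w.length : Int) > K) then
      match w with
      | [] => ([], s, e)          -- unreachable: w ends in dish
      | old :: rest => (rest, PySem.Set.discard s old, e)
    else (w, s, e)

def getMaximumEatenDishCount_alt (N : Int) (D : List Int) (K : Int) : Int :=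
  (D.foldl (pvBStep K) (([] : List Int), PySem.Set.empty, 0)).2.2

-- ===== PRECONDITION & SPEC =====
def Spec_getMaximumEatenDishCount (N : Int) (D : List Int) (K : Int) (out : Int) : Prop := out = getMaximumEatenDishCount_alt N D K
instance (N : Int) (D : List Int) (K : Int) (out : Int) : Decidable (Spec_getMaximumEatenDishCount N D K out) := by unfold Spec_getMaximumEatenDishCount; infer_instance

-- ===== CLAIM (what is proved, stated in full; the proofs are below) =====
def Claim_equal_getMaximumEatenDishCount : Prop := ∀ (N : Int) (D : List Int) (K : Int), Dom_getMaximumEatenDishCount N D K → Spec_getMaximumEatenDishCount N D K (getMaximumEatenDishCount N D K)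

-- ===== LEMMAS AND PROOFS =====

-- The coupling invariant between A's state (m, e) and B's state (w, s, e):
-- w lists, oldest first, the dishes whose recorded counter lies in (e - w.length, e],
-- s has the same members as w, and w never exceeds max K 0 elements.
def pvInv (K : Int) (m : PySem.Dict Int Int) (e : Int) (w : List Int) (s : PySem.Set Int) : Prop :=
  (∀ (j : Nat) (h : j < w.length),
      PySem.Dict.get? m w[j] = some (e - (w.length : Int) + 1 + (j : Int))) ∧
  (∀ d t, PySem.Dict.get? m d = some t → e - t < K → d ∈ w) ∧
  (∀ x : Int, x ∈ s ↔ x ∈ w) ∧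
  ((w.length : Int) ≤ max K 0)

lemma pvInv_nodup {K m e w s} (h : pvInv K m e w s) : w.Nodup := by
  rw [List.nodup_iff_injective_getElem]
  rintro ⟨i, hi⟩ ⟨j, hj⟩ hij
  simp only at hij
  have h1 := h.1 i hi
  have h2 := h.1 j hj
  rw [hij, h2] at h1
  have := Option.some.inj h1
  exact Fin.ext (by simp only at this ⊢; omega)

lemma pvInv_mem_iff {K m e w s} (h : pvInv K m e w s) (d : Int) :
    d ∈ w ↔ ∃ t, PySem.Dict.get? m d = some t ∧ e - t < K := by
  constructor
  · intro hd
    obtain ⟨j, hj, rfl⟩ := List.getElem_of_mem hd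
    refine ⟨e - (w.length : Int) + 1 + (j : Int), h.1 j hj, ?_⟩
    have hL := h.2.2.2
    have hjL : (j : Int) < (w.length : Int) := by exact_mod_cast hj
    omega
  · rintro ⟨t, ht, hlt⟩
    exact h.2.1 d t ht hlt

lemma pvStep_eq (K : Int) (m : PySem.Dict Int Int) (e : Int) (w : List Int)
    (s : PySem.Set Int) (d : Int) (h : pvInv K m e w s) :
    (pvAStep K (m, e) d).2 = (pvBStep K (w, s, e) d).2.2 ∧
    pvInv K (pvAStep K (m, e) d).1 (pvAStep K (m, e) d).2
      (pvBStep K (w, s, e) d).1 (pvBStep K (w, s, e) d).2.1 := by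
  by_cases hd : d ∈ w
  · -- dish is in the window: both skip
    obtain ⟨t, ht, hlt⟩ := (pvInv_mem_iff h d).1 hd
    have hcont : PySem.Set.contains s d = true := (PySem.Set.contains_iff s d).2 ((h.2.2.1 d).2 hd)
    have hB : pvBStep K (w, s, e) d = (w, s, e) := by unfold pvBStep; rw [if_pos hcont]
    have hA : pvAStep K (m, e) d = (m, e) := by
      unfold pvAStep; rw [ht]; simp only; rw [if_neg (by omega)]
    rw [hA, hB]; exact ⟨rfl, h⟩
  · -- dish not in the window: both eat
    have hmem : ¬ d ∈ s := fun hx => hd ((h.2.2.1 d).1 hx)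
    have hcont : ¬ PySem.Set.contains s d = true := by rw [PySem.Set.contains_iff]; exact hmem
    have hA : pvAStep K (m, e) d = (PySem.Dict.insert m d (e + 1), e + 1) := by
      unfold pvAStep
      cases hmd : PySem.Dict.get? m d with
      | none => simp
      | some t =>
          have : e - t ≥ K := by
            by_contra hlt
            exact hd (h.2.1 d t hmd (by omega))
          simp [this]
    have hLmax := h.2.2.2
    by_cases hpop : ((w.length : Int) + 1 > K)
    · -- eat and evict the oldest window element
      cases w with
      | nil =>
          simp only [List.length_nil, Nat.cast_zero] at hpop hLmax
          have hK0 : K ≤ 0 := by omega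
          have hB : pvBStep K (([] : List Int), s, e) d = ([], PySem.Set.discard (PySem.Set.add s d) d, e + 1) := by
            unfold pvBStep; rw [if_neg hcont]
            simp only [List.nil_append, List.length_cons, List.length_nil]
            rw [if_pos (by push_cast; omega)]
          rw [hA, hB]
          dsimp only
          refine ⟨rfl, ?_, ?_, ?_, by simp only [List.length_nil, Nat.cast_zero]; omega⟩
          · intro j hj; simp at hj
          · intro d' t ht hlt
            by_cases hdd : d' = d
            · subst hdd
              rw [PySem.Dict.get?_insert_self] at ht
              have := Option.some.inj ht
              omega
            · rw [PySem.Dict.get?_insert_of_ne _ _ hdd] at ht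
              exact absurd (h.2.1 d' t ht (by omega)) (by simp)
          · intro x
            have hs := h.2.2.1 x
            simp only [List.not_mem_nil, iff_false] at hs
            simp only [PySem.Set.mem_discard, PySem.Set.mem_add, List.not_mem_nil, iff_false]
            tauto
      | cons f ws =>
          simp only [List.length_cons] at hpop hLmax
          push_cast at hpop
          have hLK : ((ws.length : Int) + 1) = K := by
            push_cast at hLmax ⊢
            omega
          have hnd := pvInv_nodup h
          have hfws : f ∉ ws := by simp [List.nodup_cons] at hnd; exact hnd.1
          have hdf : d ≠ f := fun hdf => hd (by simp [hdf])
          have hdws : d ∉ ws := fun hx => hd (by simp [hx])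
          have hf := h.1 0 (by simp)
          simp only [List.getElem_cons_zero, List.length_cons] at hf
          push_cast at hf
          have hB : pvBStep K ((f :: ws), s, e) d =
              (ws ++ [d], PySem.Set.discard (PySem.Set.add s d) f, e + 1) := by
            unfold pvBStep; rw [if_neg hcont]
            simp only [List.cons_append, List.length_cons, List.length_append]
            rw [if_pos (by push_cast; omega)]
          rw [hA, hB]
          dsimp only
          refine ⟨rfl, ?_, ?_, ?_, ?_⟩
          · intro j hj
            simp only [List.length_append, List.length_singleton] at hj ⊢
            rcases Nat.lt_or_ge j ws.length with hjw | hjw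
            · rw [List.getElem_append_left hjw]
              have hne : ws[j] ≠ d := fun hx => hdws (hx ▸ List.getElem_mem hjw)
              rw [PySem.Dict.get?_insert_of_ne _ _ hne]
              have hidx := h.1 (j + 1) (by simp; omega)
              simp only [List.getElem_cons_succ, List.length_cons] at hidx
              rw [hidx]
              congr 1
              push_cast
              ring
            · have hje : j = ws.length := by omega
              subst hje
              rw [List.getElem_append_right (by omega)]
              simp only [Nat.sub_self, List.getElem_singleton]
              rw [PySem.Dict.get?_insert_self]
              congr 1
              push_cast
              ring
          · intro d' t ht hlt
            by_cases hdd : d' = d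
            · subst hdd; simp
            · rw [PySem.Dict.get?_insert_of_ne _ _ hdd] at ht
              have hmem' := h.2.1 d' t ht (by omega)
              rcases List.mem_cons.1 hmem' with hdf' | hdw
              · subst hdf'
                rw [hf] at ht
                have := Option.some.inj ht
                omega
              · exact List.mem_append_left _ hdw
          · intro x
            have hs := h.2.2.1 x
            simp only [PySem.Set.mem_discard, PySem.Set.mem_add, hs, List.mem_cons,
              List.mem_append, List.not_mem_nil, or_false]
            constructor
            · rintro ⟨(hxf | hxw) | hxd, hne⟩
              · exact absurd hxf hne
              · exact Or.inl hxw
              · exact Or.inr hxd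
            · rintro (hxw | hxd)
              · exact ⟨Or.inl (Or.inr hxw), fun hxf => hfws (hxf ▸ hxw)⟩
              · exact ⟨Or.inr hxd, fun hxf => hdf (hxd ▸ hxf)⟩
          · simp only [List.length_append, List.length_singleton]
            push_cast
            omega
    · -- eat, window not yet full
      have hB : pvBStep K (w, s, e) d = (w ++ [d], PySem.Set.add s d, e + 1) := by
        unfold pvBStep; rw [if_neg hcont]
        rw [if_neg (by simp only [List.length_append, List.length_singleton]; push_cast; omega)]
      rw [hA, hB]
      dsimp only
      refine ⟨rfl, ?_, ?_, ?_, ?_⟩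
      · intro j hj
        simp only [List.length_append, List.length_singleton] at hj ⊢
        rcases Nat.lt_or_ge j w.length with hjw | hjw
        · rw [List.getElem_append_left hjw]
          have hne : w[j] ≠ d := fun hx => hd (hx ▸ List.getElem_mem hjw)
          rw [PySem.Dict.get?_insert_of_ne _ _ hne]
          rw [h.1 j hjw]
          congr 1
          push_cast
          ring
        · have hje : j = w.length := by omega
          subst hje
          rw [List.getElem_append_right (by omega)]
          simp only [Nat.sub_self, List.getElem_singleton]
          rw [PySem.Dict.get?_insert_self]
          congr 1
          push_cast
          ring
      · intro d' t ht hlt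
        by_cases hdd : d' = d
        · subst hdd; simp
        · rw [PySem.Dict.get?_insert_of_ne _ _ hdd] at ht
          exact List.mem_append_left _ (h.2.1 d' t ht (by omega))
      · intro x
        have hs := h.2.2.1 x
        simp [PySem.Set.mem_add, hs, List.mem_append]
      · simp only [List.length_append, List.length_singleton]
        push_cast
        omega

lemma pvLoop_eq (K : Int) : ∀ (D : List Int) (m : PySem.Dict Int Int) (e : Int)
    (w : List Int) (s : PySem.Set Int), pvInv K m e w s →
    (D.foldl (pvAStep K) (m, e)).2 = (D.foldl (pvBStep K) (w, s, e)).2.2 := by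
  intro D
  induction D with
  | nil => intro m e w s _; rfl
  | cons d rest ih =>
      intro m e w s h
      obtain ⟨heq, hinv⟩ := pvStep_eq K m e w s d h
      simp only [List.foldl_cons]
      have : pvBStep K (w, s, e) d =
          ((pvBStep K (w, s, e) d).1, (pvBStep K (w, s, e) d).2.1, (pvBStep K (w, s, e) d).2.2) := rfl
      rw [this, ← heq]
      have hA : pvAStep K (m, e) d = ((pvAStep K (m, e) d).1, (pvAStep K (m, e) d).2) := rfl
      rw [hA] at hinv ⊢
      exact ih _ _ _ _ hinv

lemma pvInv_init (K : Int) : pvInv K PySem.Dict.empty 0 [] PySem.Set.empty := by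
  refine ⟨by intro j h; simp at h, ?_, by simp [PySem.Set.empty], by simp⟩
  intro d t ht
  simp [PySem.Dict.get?_empty] at ht

-- ===== VERDICT (by name: the statement is the Claim_ definition above) =====
theorem getMaximumEatenDishCount_spec : Claim_equal_getMaximumEatenDishCount := by
  intro N D K _
  unfold Spec_getMaximumEatenDishCount getMaximumEatenDishCount getMaximumEatenDishCount_alt
  exact pvLoop_eq K D _ 0 [] _ (pvInv_init K)
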